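-- pv_equiv track=rewrite | github.com/C-zu/Wumpus-Project | Game.py | stop_condition
-- ===== SOURCE A (Python) =====
-- def stop_condition(list_agent_pos,n):
--     count_stop = {}
--     for pos in list_agent_pos:
--         if pos not in count_stop.keys():
--             count_stop[pos] = 0
--         else:
--             count_stop[pos] += 1
--     result = [key for key, value in count_stop.items() if value >= n]
--     return len(result)>0
-- ===== SOURCE B (Python) =====
-- def stop_condition(list_agent_pos, n):
--     run = 0
--     prev = None
--     for pos in sorted(list_agent_pos):
--         run = run + 1 if pos == prev else 1
--         if run > n:
--             return True
--         prev = pos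
--     return False
-- ===== Notes on version B (the rewrite author's own statement) =====
-- stated objective: alternative
-- what changed: Replaces A's dict-based occurrence counting plus a filtering comprehension by sort-then-scan: B sorts the positions and makes one pass tracking the length of the current run of equal positions, returning True as soon as a run exceeds n.
import Mathlib
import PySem

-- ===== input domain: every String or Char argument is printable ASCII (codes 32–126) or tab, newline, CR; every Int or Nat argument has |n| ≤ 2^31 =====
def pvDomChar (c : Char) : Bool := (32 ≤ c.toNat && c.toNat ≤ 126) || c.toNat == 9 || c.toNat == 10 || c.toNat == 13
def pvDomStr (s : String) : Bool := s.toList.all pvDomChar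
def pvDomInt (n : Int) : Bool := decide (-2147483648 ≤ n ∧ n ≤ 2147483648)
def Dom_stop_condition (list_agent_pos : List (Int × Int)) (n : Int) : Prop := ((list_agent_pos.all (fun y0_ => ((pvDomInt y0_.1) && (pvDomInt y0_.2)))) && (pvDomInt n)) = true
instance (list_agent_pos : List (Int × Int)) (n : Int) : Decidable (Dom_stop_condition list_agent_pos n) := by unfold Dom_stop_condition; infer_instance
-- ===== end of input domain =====

-- B replaces A's dict-counting + filter pass by sort-then-run-scan (a different algorithm of similar cost).

-- ===== PORT A =====
-- the 'for pos in list_agent_pos' loop building count_stop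
def stop_condition (list_agent_pos : List (Int × Int)) (n : Int) : Bool :=
  let count_stop := list_agent_pos.foldl
    (fun d pos =>
      if d.contains pos = false then d.insert pos 0 else d.modify pos 0 (· + 1))
    PySem.Dict.empty
  let result := (count_stop.items.filter (fun kv => decide (kv.2 ≥ n))).map (·.1)
  decide (result.length > 0)

-- ===== PORT B =====
-- the 'for pos in sorted(list_agent_pos)' loop of Source B, carrying prev and run
def stopScan (n : Int) : List (Int × Int) → Option (Int × Int) → Int → Bool
  | [], _, _ => false
  | pos :: rest, prev, run =>
    let run' := if some pos = prev then run + 1 else 1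
    if run' > n then true else stopScan n rest (some pos) run'

def stop_condition_alt (list_agent_pos : List (Int × Int)) (n : Int) : Bool :=
  stopScan n (PySem.List.sorted2 list_agent_pos (fun p => p.1) (fun p => p.2) false) none 0

-- ===== PRECONDITION & SPEC =====
def Spec_stop_condition (list_agent_pos : List (Int × Int)) (n : Int) (out : Bool) : Prop := out = stop_condition_alt list_agent_pos n
instance (list_agent_pos : List (Int × Int)) (n : Int) (out : Bool) : Decidable (Spec_stop_condition list_agent_pos n out) := by unfold Spec_stop_condition; infer_instance

-- ===== CLAIM (what is proved, stated in full; the proofs are below) =====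
def Claim_equal_stop_condition : Prop := ∀ (list_agent_pos : List (Int × Int)) (n : Int), Dom_stop_condition list_agent_pos n → Spec_stop_condition list_agent_pos n (stop_condition list_agent_pos n)

-- ===== LEMMAS AND PROOFS =====

-- Python's tuple comparison used by sorted(): the comparator sorted2 builds
def pvLt (a b : Int × Int) : Bool :=
  decide (a.1 < b.1) || (!decide (b.1 < a.1) && decide (a.2 < b.2))

lemma pvLt_trans_neg {a b c : Int × Int} (h1 : pvLt b a = false) (h2 : pvLt c b = false) :
    pvLt c a = false := by
  rcases a with ⟨a1, a2⟩; rcases b with ⟨b1, b2⟩; rcases c with ⟨c1, c2⟩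
  simp [pvLt] at *; omega

lemma pvLt_antisymm_neg {a b : Int × Int} (h1 : pvLt b a = false) (h2 : pvLt a b = false) :
    a = b := by
  rcases a with ⟨a1, a2⟩; rcases b with ⟨b1, b2⟩
  simp [pvLt] at *
  obtain ⟨x1, x2⟩ := h1; obtain ⟨y1, y2⟩ := h2
  constructor <;> omega

lemma pvLt_total (a b : Int × Int) : pvLt a b = false ∨ pvLt b a = false := by
  rcases a with ⟨a1, a2⟩; rcases b with ⟨b1, b2⟩
  simp [pvLt]; omega

abbrev pvR (a b : Int × Int) : Prop := pvLt b a = false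

lemma dropWhile_head_false {α : Type} (p : α → Bool) :
    ∀ (l : List α) (y : α) (ys : List α), l.dropWhile p = y :: ys → p y = false := by
  intro l
  induction l with
  | nil => intro y ys h; cases h
  | cons a as ih =>
    intro y ys h
    rw [List.dropWhile_cons] at h
    by_cases hp : p a = true
    · rw [if_pos hp] at h; exact ih y ys h
    · rw [if_neg hp] at h
      cases h
      simpa using hp

lemma pairwise_insertBy (x : Int × Int) (ys : List (Int × Int)) (h : ys.Pairwise pvR) :
    (PySem.List.insertBy pvLt x ys).Pairwise pvR := by
  induction ys with
  | nil => simp [PySem.List.insertBy]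
  | cons y ys ih =>
    rw [List.pairwise_cons] at h
    obtain ⟨hy, hys⟩ := h
    by_cases hb : pvLt x y = true
    · have heq : PySem.List.insertBy pvLt x (y :: ys) = x :: y :: ys := by
        simp [PySem.List.insertBy, hb]
      rw [heq, List.pairwise_cons]
      refine ⟨?_, List.pairwise_cons.mpr ⟨hy, hys⟩⟩
      intro z hz
      have hxy : pvR x y := by
        rcases pvLt_total x y with hc | hc
        · exact absurd hb (by simp [hc])
        · exact hc
      rcases List.mem_cons.mp hz with rfl | hz
      · exact hxy
      · exact pvLt_trans_neg hxy (hy z hz)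
    · have hb' : pvLt x y = false := by simpa using hb
      have heq : PySem.List.insertBy pvLt x (y :: ys) = y :: PySem.List.insertBy pvLt x ys := by
        simp [PySem.List.insertBy, hb']
      rw [heq, List.pairwise_cons]
      refine ⟨?_, ih hys⟩
      intro z hz
      rcases (PySem.List.mem_insertBy pvLt x z ys).mp hz with rfl | hz
      · exact hb'
      · exact hy z hz

lemma sorted2_pairwise (l : List (Int × Int)) :
    (PySem.List.sorted2 l (fun p => p.1) (fun p => p.2) false).Pairwise pvR := by
  show (List.foldl (fun acc x => PySem.List.insertBy pvLt x acc) [] l).Pairwise pvR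
  have H : ∀ (l acc : List (Int × Int)), acc.Pairwise pvR →
      (List.foldl (fun acc x => PySem.List.insertBy pvLt x acc) acc l).Pairwise pvR := by
    intro l
    induction l with
    | nil => intro acc h; simpa using h
    | cons x xs ih => intro acc h; exact ih _ (pairwise_insertBy x acc h)
  exact H l [] (by simp)

-- ===== A-side characterisation =====

lemma stepA (d : PySem.Dict (Int × Int) Int) (x : Int × Int) :
    (if d.contains x = false then d.insert x 0 else d.modify x 0 (· + 1)) =
    d.modify x (-1) (· + 1) := by
  by_cases h : d.contains x = false
  · rw [if_pos h]
    unfold PySem.Dict.modify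
    rw [PySem.Dict.getD_of_not_contains d _ h]
    norm_num
  · rw [if_neg h]
    have hc : d.contains x = true := by simpa using h
    rw [PySem.Dict.contains_eq_isSome_get?] at hc
    obtain ⟨w, hw⟩ := Option.isSome_iff_exists.mp hc
    unfold PySem.Dict.modify PySem.Dict.getD
    rw [hw]
    simp

lemma getD_foldl_modify_neg1 (l : List (Int × Int)) (d : PySem.Dict (Int × Int) Int)
    (v : Int × Int) :
    (l.foldl (fun d x => d.modify x (-1) (· + 1)) d).getD v (-1) =
    d.getD v (-1) + l.count v := by
  induction l generalizing d with
  | nil => simp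
  | cons x xs ih =>
    rw [List.foldl_cons, ih, PySem.Dict.getD_modify]
    by_cases hvx : v = x
    · subst hvx; simp; omega
    · rw [if_neg hvx]
      have h2 : (x == v) = false := by simpa using Ne.symm hvx
      simp [List.count_cons, h2]

lemma A_char (l : List (Int × Int)) (n : Int) :
    stop_condition l n = true ↔ ∃ p ∈ l, n < (l.count p : Int) := by
  have hA : stop_condition l n = decide
      (((((l.foldl (fun d pos => if d.contains pos = false then d.insert pos 0
            else d.modify pos 0 (· + 1)) PySem.Dict.empty).items.filter
          (fun kv => decide (kv.2 ≥ n))).map (·.1)).length) > 0) := rfl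
  rw [hA]
  rw [PySem.List.foldl_congr_mem l
    (fun d pos => if d.contains pos = false then d.insert pos 0 else d.modify pos 0 (· + 1))
    (fun d x => d.modify x (-1) (· + 1)) PySem.Dict.empty
    (fun acc x _ => stepA acc x)]
  set D := l.foldl (fun d x => d.modify x (-1) (· + 1)) PySem.Dict.empty with hD
  have hkeys : D.keys = PySem.Set.ofList l := by
    have h := PySem.Dict.keys_foldl_modify l (-1 : Int) (fun _ _ => (· + 1))
      (PySem.Dict.empty (κ := Int × Int))
    simpa [PySem.Set.update, PySem.Set.ofList, PySem.Set.empty, PySem.Dict.keys_empty, hD] using h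
  have hnd : D.keys.Nodup := by
    rw [hkeys]; exact PySem.Set.nodup_ofList l
  have hget : ∀ v, D.getD v (-1) = -1 + l.count v := by
    intro v; rw [hD, getD_foldl_modify_neg1]; simp
  rw [PySem.Dict.items_eq_map_keys D hnd (-1)]
  rw [decide_eq_true_iff]
  rw [List.filter_map, List.length_map, List.length_map]
  simp only [gt_iff_lt, List.length_pos_iff, ne_eq, List.filter_eq_nil_iff]
  push_neg
  constructor
  · rintro ⟨k, hk, hq⟩
    refine ⟨k, (PySem.Set.mem_ofList l k).mp (hkeys ▸ hk), ?_⟩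
    simp only [Function.comp, decide_eq_true_iff, ge_iff_le] at hq
    rw [hget k] at hq
    omega
  · rintro ⟨p, hp, hnp⟩
    refine ⟨p, hkeys ▸ (PySem.Set.mem_ofList l p).mpr hp, ?_⟩
    simp only [Function.comp, decide_eq_true_iff, ge_iff_le]
    rw [hget p]
    omega

-- ===== B-side characterisation =====

lemma scan_rep (n : Int) (x : Int × Int) (k : Nat) (t : List (Int × Int)) (r : Int) :
    stopScan n (List.replicate k x ++ t) (some x) r =
    if 1 ≤ k ∧ n < r + k then true else stopScan n t (some x) (r + k) := by
  induction k generalizing r with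
  | zero => simp
  | succ k ih =>
    rw [List.replicate_succ, List.cons_append]
    simp only [stopScan, if_true]
    by_cases h : r + 1 > n
    · rw [if_pos h, if_pos ⟨by omega, by push_cast; omega⟩]
    · rw [if_neg h, ih]
      by_cases hk : 1 ≤ k ∧ n < r + 1 + (k : Int)
      · rw [if_pos hk, if_pos ⟨by omega, by push_cast; omega⟩]
      · rw [if_neg hk, if_neg (by push_cast; omega)]
        congr 1
        push_cast
        ring

lemma scan_fresh (n : Int) (t : List (Int × Int)) (x : Int × Int) (r : Int)
    (hx : x ∉ t) :
    stopScan n t (some x) r = stopScan n t none 0 := by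
  cases t with
  | nil => rfl
  | cons y ys =>
    have hyx : ¬ (some y = some x) := by
      simp only [Option.some_inj]
      intro h; exact hx (h ▸ List.mem_cons_self)
    simp only [stopScan, if_neg hyx, reduceCtorEq, if_false]

lemma decomp_sorted (s : List (Int × Int)) (hs : s.Pairwise pvR) (x : Int × Int)
    (rest : List (Int × Int)) (hsx : s = x :: rest) :
    ∃ (k : Nat) (t : List (Int × Int)), s = List.replicate (k + 1) x ++ t ∧ x ∉ t ∧
      t.Pairwise pvR ∧ t.length < s.length := by
  refine ⟨(s.takeWhile (fun y => y == x)).length - 1, s.dropWhile (fun y => y == x), ?_, ?_, ?_, ?_⟩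
  · have htw : s.takeWhile (fun y => y == x) =
        List.replicate (s.takeWhile (fun y => y == x)).length x := by
      apply List.eq_replicate_of_mem
      intro y hy
      simpa using List.mem_takeWhile_imp hy
    have hpos : 1 ≤ (s.takeWhile (fun y => y == x)).length := by
      rw [hsx, List.takeWhile_cons]
      simp
    have hlen : (s.takeWhile (fun y => y == x)).length - 1 + 1 =
        (s.takeWhile (fun y => y == x)).length := by omega
    rw [hlen, ← htw, List.takeWhile_append_dropWhile]
  · intro hmem
    cases hdw : s.dropWhile (fun y => y == x) with
    | nil => rw [hdw] at hmem; exact absurd hmem List.not_mem_nil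
    | cons y ys =>
      have hyne : y ≠ x := by
        have h9 := dropWhile_head_false (fun y => y == x) s y ys hdw
        simpa using h9
      rw [hdw] at hmem
      have hsuffix : (y :: ys).Pairwise pvR := by
        have hsub : (s.dropWhile (fun y => y == x)).Sublist s := List.dropWhile_sublist _
        rw [hdw] at hsub
        exact hs.sublist hsub
      rcases List.mem_cons.mp hmem with heq | hmem
      · exact hyne heq.symm
      · have hRyx : pvR y x := (List.pairwise_cons.mp hsuffix).1 x hmem
        have hRxy : pvR x y := by
          rw [hsx] at hs
          have hxall := (List.pairwise_cons.mp hs).1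
          have hyrest : y ∈ rest := by
            have hyd : y ∈ s.dropWhile (fun y => y == x) := by
              rw [hdw]; exact List.mem_cons_self
            have hys : y ∈ s := List.Sublist.mem hyd (List.dropWhile_sublist _)
            rw [hsx] at hys
            rcases List.mem_cons.mp hys with heq | h
            · exact absurd heq hyne
            · exact h
          exact hxall y hyrest
        exact hyne (pvLt_antisymm_neg hRyx hRxy)
  · exact hs.sublist (List.dropWhile_sublist _)
  · rw [hsx, List.dropWhile_cons]
    simp only [beq_self_eq_true, if_true]
    have hle := List.length_dropWhile_le (fun y => y == x) rest
    simp only [List.length_cons]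
    omega

lemma scan_sorted (n : Int) : ∀ (m : Nat) (s : List (Int × Int)), s.length = m →
    s.Pairwise pvR →
    (stopScan n s none 0 = true ↔ ∃ p ∈ s, n < (s.count p : Int)) := by
  intro m
  induction m using Nat.strong_induction_on with
  | _ m ih =>
    intro s hm hs
    cases hsx : s with
    | nil => simp [stopScan]
    | cons x rest =>
      obtain ⟨k, t, hdec, hxt, hpt, hlt⟩ := decomp_sorted s (hsx ▸ hs) x rest hsx
      rw [← hsx, hdec, List.replicate_succ, List.cons_append]
      have hct : t.count x = 0 := List.count_eq_zero.mpr hxt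
      have hcx : (x :: (List.replicate k x ++ t)).count x = k + 1 := by
        simp [List.count_append, hct]
      have hcp : ∀ p, p ≠ x → (x :: (List.replicate k x ++ t)).count p = t.count p := by
        intro p hp
        have h2 : ¬ (x = p) := fun he => hp he.symm
        simp [List.count_append, List.count_replicate, h2]
      show (if (1 : Int) > n then true else stopScan n (List.replicate k x ++ t) (some x) 1)
          = true ↔ _
      by_cases hn : (1 : Int) > n
      · rw [if_pos hn]
        constructor
        · intro _
          refine ⟨x, List.mem_cons_self, ?_⟩
          rw [hcx]; push_cast; omega
        · intro _; rfl
      · rw [if_neg hn, scan_rep]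
        have hfresh : stopScan n t (some x) (1 + k) = stopScan n t none 0 :=
          scan_fresh n t x (1 + k) hxt
        have hiht : stopScan n t none 0 = true ↔ ∃ p ∈ t, n < (t.count p : Int) := by
          apply ih t.length _ t rfl hpt
          omega
        constructor
        · intro h
          by_cases hcase : 1 ≤ k ∧ n < 1 + (k : Int)
          · refine ⟨x, List.mem_cons_self, ?_⟩
            rw [hcx]; push_cast; omega
          · rw [if_neg hcase, hfresh] at h
            obtain ⟨p, hp, hnp⟩ := hiht.mp h
            have hpx : p ≠ x := fun he => hxt (he ▸ hp)
            refine ⟨p, List.mem_cons_of_mem _ (List.mem_append_right _ hp), ?_⟩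
            rw [hcp p hpx]
            exact hnp
        · rintro ⟨p, hp, hnp⟩
          by_cases hpx : p = x
          · subst hpx
            rw [hcx] at hnp
            rw [if_pos ⟨by push_cast at hnp; omega, by push_cast at hnp ⊢; omega⟩]
          · rw [hcp p hpx] at hnp
            have hpt' : p ∈ t := by
              rcases List.mem_cons.mp hp with heq | hp2
              · exact absurd heq hpx
              · rcases List.mem_append.mp hp2 with h | h
                · exact absurd (List.eq_of_mem_replicate h) hpx
                · exact h
            by_cases hcase : 1 ≤ k ∧ n < 1 + (k : Int)
            · rw [if_pos hcase]
            · rw [if_neg hcase, hfresh]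
              exact hiht.mpr ⟨p, hpt', hnp⟩

lemma B_char (l : List (Int × Int)) (n : Int) :
    stop_condition_alt l n = true ↔ ∃ p ∈ l, n < (l.count p : Int) := by
  unfold stop_condition_alt
  have hsp : (PySem.List.sorted2 l (fun p => p.1) (fun p => p.2) false).Pairwise pvR :=
    sorted2_pairwise l
  have hperm : (PySem.List.sorted2 l (fun p => p.1) (fun p => p.2) false).Perm l :=
    PySem.List.sorted2_perm l _ _ false
  rw [scan_sorted n _ _ rfl hsp]
  constructor
  · rintro ⟨p, hp, hc⟩
    exact ⟨p, hperm.mem_iff.mp hp, by rwa [hperm.count_eq] at hc⟩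
  · rintro ⟨p, hp, hc⟩
    exact ⟨p, hperm.mem_iff.mpr hp, by rwa [hperm.count_eq]⟩

-- ===== VERDICT (by name: the statement is the Claim_ definition above) =====
theorem stop_condition_spec : Claim_equal_stop_condition := by
  intro l n _
  unfold Spec_stop_condition
  rw [Bool.eq_iff_iff, A_char, B_char]
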